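-- pv_equiv track=rewrite | github.com/ZYXFR/CFAChatBot | utils.py | split_events
-- ===== SOURCE A (Python) =====
-- def split_events(events: list) -> tuple:
--     classics, candlesticks, indicators, oscillators = [], [], [], []
--     for event in events:
--         if event["event class"] == "classic":
--             classics.append(event)
--         elif event["event class"] == "shortterm":
--             candlesticks.append(event)
--         elif event["event class"] == "indicator":
--             indicators.append(event)
--         elif event["event class"] == "oscillator":
--             oscillators.append(event)
--     return classics, candlesticks, indicators, oscillators
-- ===== SOURCE B (Python) =====
-- def split_events(events: list) -> tuple:
--     def of_class(cls):
--         return [e for e in events if e["event class"] == cls]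
--     return (of_class("classic"), of_class("shortterm"),
--             of_class("indicator"), of_class("oscillator"))
-- ===== Notes on version B (the rewrite author's own statement) =====
-- stated objective: simpler
-- what changed: Replaces A's single pass with a four-way if/elif branch and four mutable accumulators by four independent filter passes (one list comprehension per class), eliminating branching and accumulator state entirely.
import Mathlib
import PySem

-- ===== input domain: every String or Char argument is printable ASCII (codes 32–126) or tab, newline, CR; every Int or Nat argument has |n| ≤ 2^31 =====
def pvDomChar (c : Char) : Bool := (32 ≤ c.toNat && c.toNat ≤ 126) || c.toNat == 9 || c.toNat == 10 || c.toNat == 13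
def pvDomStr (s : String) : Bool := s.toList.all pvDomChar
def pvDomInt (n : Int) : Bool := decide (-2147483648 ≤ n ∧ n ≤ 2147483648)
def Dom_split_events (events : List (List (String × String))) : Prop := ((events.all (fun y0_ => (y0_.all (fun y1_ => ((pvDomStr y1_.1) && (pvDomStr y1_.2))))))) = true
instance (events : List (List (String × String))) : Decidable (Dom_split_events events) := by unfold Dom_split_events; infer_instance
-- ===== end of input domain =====

-- B replaces A's single branching pass with four accumulators by four independent filter
-- passes, one per class; same values, a plainer decomposition (no speed claim).

-- event["event class"]: first-match lookup in the association list; "" only where the key is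
-- missing, which Pre_ excludes (Python raises KeyError there).
def pvKeyOf (e : List (String × String)) : String :=
  PySem.Dict.getD (PySem.Dict.mk e) "event class" ""

-- ===== PORT A =====
def split_events (events : List (List (String × String))) : (List (List (String × String))) × (List (List (String × String))) × (List (List (String × String))) × (List (List (String × String))) :=
  events.foldl (fun acc e =>
    let c := pvKeyOf e
    if c == "classic" then (acc.1 ++ [e], acc.2.1, acc.2.2.1, acc.2.2.2)
    else if c == "shortterm" then (acc.1, acc.2.1 ++ [e], acc.2.2.1, acc.2.2.2)
    else if c == "indicator" then (acc.1, acc.2.1, acc.2.2.1 ++ [e], acc.2.2.2)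
    else if c == "oscillator" then (acc.1, acc.2.1, acc.2.2.1, acc.2.2.2 ++ [e])
    else acc) ([], [], [], [])

-- ===== PORT B =====
-- one filter pass per class, as in Source B's of_class comprehension
def pvOfClass (events : List (List (String × String))) (cls : String) : List (List (String × String)) :=
  events.filter (fun e => pvKeyOf e == cls)

def split_events_alt (events : List (List (String × String))) : (List (List (String × String))) × (List (List (String × String))) × (List (List (String × String))) × (List (List (String × String))) :=
  (pvOfClass events "classic", pvOfClass events "shortterm",
   pvOfClass events "indicator", pvOfClass events "oscillator")

-- ===== PRECONDITION & SPEC =====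
-- Pre_ excludes exactly the inputs where some event lacks the key "event class": Python A raises KeyError there.
def Pre_split_events (events : List (List (String × String))) : Prop :=
  (events.all (fun e => (PySem.Dict.mk e).contains "event class")) = true
instance (events : List (List (String × String))) : Decidable (Pre_split_events events) := by unfold Pre_split_events; infer_instance

def pvWitness_split_events : (List (List (String × String))) :=
  [[("event class", "classic"), ("name", "hammer")],
   [("event class", "oscillator")],
   [("event class", "other")]]

def Spec_split_events (events : List (List (String × String))) (out : (List (List (String × String))) × (List (List (String × String))) × (List (List (String × String))) × (List (List (String × String)))) : Prop := out = split_events_alt events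
instance (events : List (List (String × String))) (out : (List (List (String × String))) × (List (List (String × String))) × (List (List (String × String))) × (List (List (String × String)))) : Decidable (Spec_split_events events out) := by unfold Spec_split_events; infer_instance

-- ===== CLAIM (what is proved, stated in full; the proofs are below) =====
def Claim_equal_split_events : Prop := ∀ (events : List (List (String × String))), Dom_split_events events → Pre_split_events events → Spec_split_events events (split_events events)

-- ===== LEMMAS AND PROOFS =====

-- A's loop from an arbitrary accumulator appends, per bucket, the events of that class in order.
theorem pvA_fold (events : List (List (String × String)))
    (a b c d : List (List (String × String))) :
    events.foldl (fun acc e =>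
      let k := pvKeyOf e
      if k == "classic" then (acc.1 ++ [e], acc.2.1, acc.2.2.1, acc.2.2.2)
      else if k == "shortterm" then (acc.1, acc.2.1 ++ [e], acc.2.2.1, acc.2.2.2)
      else if k == "indicator" then (acc.1, acc.2.1, acc.2.2.1 ++ [e], acc.2.2.2)
      else if k == "oscillator" then (acc.1, acc.2.1, acc.2.2.1, acc.2.2.2 ++ [e])
      else acc) (a, b, c, d)
    = (a ++ events.filter (fun e => pvKeyOf e == "classic"),
       b ++ events.filter (fun e => pvKeyOf e == "shortterm"),
       c ++ events.filter (fun e => pvKeyOf e == "indicator"),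
       d ++ events.filter (fun e => pvKeyOf e == "oscillator")) := by
  induction events generalizing a b c d with
  | nil => simp
  | cons e es ih =>
    simp only [List.foldl_cons, List.filter_cons]
    by_cases h1 : pvKeyOf e == "classic" <;>
      by_cases h2 : pvKeyOf e == "shortterm" <;>
        by_cases h3 : pvKeyOf e == "indicator" <;>
          by_cases h4 : pvKeyOf e == "oscillator" <;>
            simp_all

-- ===== VERDICT (by name: the statement is the Claim_ definition above) =====
theorem split_events_spec : Claim_equal_split_events := by
  intro events _ _
  unfold Spec_split_events split_events split_events_alt pvOfClass
  rw [pvA_fold]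
  simp
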